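-- pv_equiv track=rewrite | github.com/arghyabi/Computer8Bit | Microcode/GenMicrocode/ParseInstruction.py | getValueFromList
-- ===== SOURCE A (Python) =====
-- def getValueFromList(comingValMatrix):
--     valMatrix = []
--     for index in range(len(comingValMatrix), 0 ,-1):
--         valMatrix.append(comingValMatrix[index-1])
--     value = 0
--     for i in range(len(valMatrix)):
--         if valMatrix[i] == "1":
--             value = value | (1 << i)
--     return value
-- ===== SOURCE B (Python) =====
-- def getValueFromList(comingValMatrix):
--     value = 0
--     for c in comingValMatrix:
--         value = 2 * value + (1 if c == "1" else 0)
--     return value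
-- ===== Notes on version B (the rewrite author's own statement) =====
-- stated objective: simpler
-- what changed: Replaces A's two passes (building a reversed copy of the list, then OR-ing positional bit masks 1<<i into an accumulator) with a single left-to-right Horner pass value = 2*value + bit, with no reversed list, no indexing and no bit operations.
import Mathlib
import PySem

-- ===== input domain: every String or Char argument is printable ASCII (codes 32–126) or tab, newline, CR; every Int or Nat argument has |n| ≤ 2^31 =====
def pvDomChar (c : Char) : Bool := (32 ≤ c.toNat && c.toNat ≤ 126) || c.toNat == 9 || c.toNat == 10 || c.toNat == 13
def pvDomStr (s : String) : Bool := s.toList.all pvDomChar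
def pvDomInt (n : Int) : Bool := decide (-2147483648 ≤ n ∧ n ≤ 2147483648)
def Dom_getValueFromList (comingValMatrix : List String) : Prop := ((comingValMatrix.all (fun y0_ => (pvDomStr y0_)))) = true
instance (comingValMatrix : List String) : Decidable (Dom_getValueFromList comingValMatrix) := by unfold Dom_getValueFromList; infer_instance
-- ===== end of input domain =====

-- B replaces A's two passes (build a reversed copy, then OR shifted bit masks by position)
-- with one Horner-rule pass (value = 2*value + bit), for simplicity; same O(n) cost.

-- ===== PORT A =====
-- indices comingValMatrix[index-1] and valMatrix[i] are always in range, so pyGetD is exact here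
def getValueFromList (comingValMatrix : List String) : Int :=
  let valMatrix : List String :=
    (PySem.List.pyRange (comingValMatrix.length : Int) 0 (-1)).foldl
      (fun acc index => acc ++ [PySem.List.pyGetD comingValMatrix (index - 1) ""]) []
  (PySem.List.pyRange 0 (valMatrix.length : Int) 1).foldl
    (fun value i =>
      if PySem.List.pyGetD valMatrix i "" == "1" then
        PySem.Int.bor value ((1 : Int) <<< i.toNat)   -- 1 << i: i ∈ range(len) is nonnegative, so the Nat shift is exact
      else value) 0

-- ===== PORT B =====
def getValueFromList_alt (comingValMatrix : List String) : Int :=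
  comingValMatrix.foldl (fun value c => 2 * value + (if c == "1" then 1 else 0)) 0

-- ===== PRECONDITION & SPEC =====
def Spec_getValueFromList (comingValMatrix : List String) (out : Int) : Prop := out = getValueFromList_alt comingValMatrix
instance (comingValMatrix : List String) (out : Int) : Decidable (Spec_getValueFromList comingValMatrix out) := by unfold Spec_getValueFromList; infer_instance

-- ===== CLAIM (what is proved, stated in full; the proofs are below) =====
def Claim_equal_getValueFromList : Prop := ∀ (comingValMatrix : List String), Dom_getValueFromList comingValMatrix → Spec_getValueFromList comingValMatrix (getValueFromList comingValMatrix)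

-- ===== LEMMAS AND PROOFS =====

-- the value of a bit list read LSB-first
def pvBitsVal : List String → Int
  | [] => 0
  | c :: t => (if c == "1" then 1 else 0) + 2 * pvBitsVal t

theorem pvBitsVal_append_singleton (m : List String) (c : String) :
    pvBitsVal (m ++ [c]) = pvBitsVal m + (if c == "1" then 1 else 0) * 2 ^ m.length := by
  induction m with
  | nil => simp [pvBitsVal]
  | cons x t ih =>
    simp only [List.cons_append, pvBitsVal, ih, List.length_cons]
    ring

theorem pv_lor_two_pow (m a : Nat) (h : m < 2 ^ a) : m ||| 2 ^ a = m + 2 ^ a := by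
  have := Nat.two_pow_add_eq_or_of_lt h 1
  simpa [Nat.lor_comm, Nat.add_comm] using this.symm

theorem pv_bor_two_pow (v : Int) (a : Nat) (h0 : 0 ≤ v) (h1 : v < 2 ^ a) :
    PySem.Int.bor v (@HShiftLeft.hShiftLeft Int Nat Int Int.instHShiftLeftNat (1 : Int) a) = v + 2 ^ a := by
  have hs : @HShiftLeft.hShiftLeft Int Nat Int Int.instHShiftLeftNat (1 : Int) a = 2 ^ a := by rw [Int.shiftLeft_eq]; ring
  rw [hs, PySem.Int.bor_of_nonneg h0 (by positivity)]
  have ht : ((2 : Int) ^ a).toNat = 2 ^ a := by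
    have : ((2 : Int) ^ a) = ((2 ^ a : Nat) : Int) := by push_cast; ring
    rw [this, Int.toNat_natCast]
  have hv : (v.toNat : Int) = v := Int.toNat_of_nonneg h0
  have hlt : v.toNat < 2 ^ a := by omega
  rw [ht, pv_lor_two_pow _ _ hlt]
  push_cast
  omega

-- A's second loop, recast over enumerate: OR-ing bit a+k for each "1" at position k
theorem pv_enum_fold (l : List String) : ∀ (a : Nat) (v : Int), 0 ≤ v → v < 2 ^ a →
    (PySem.List.enumerate l (a : Int)).foldl
      (fun value p => if p.2 == "1" then PySem.Int.bor value (@HShiftLeft.hShiftLeft Int Nat Int Int.instHShiftLeftNat (1 : Int) p.1.toNat) else value) v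
    = v + 2 ^ a * pvBitsVal l := by
  induction l with
  | nil => intro a v _ _; simp [PySem.List.enumerate_nil, pvBitsVal]
  | cons c t ih =>
    intro a v h0 h1
    rw [PySem.List.enumerate_cons]
    simp only [List.foldl_cons]
    have hcast : ((a : Int) + 1) = ((a + 1 : Nat) : Int) := by push_cast; ring
    have htoNat : ((a : Int)).toNat = a := by simp
    by_cases hc : c == "1"
    · simp only [hc, if_true, htoNat, hcast]
      rw [pv_bor_two_pow v a h0 h1,
        ih (a + 1) (v + 2 ^ a) (by positivity) (by rw [pow_succ]; omega)]
      simp only [pvBitsVal, hc, if_true]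
      ring
    · simp only [hc, Bool.false_eq_true, if_false, hcast]
      rw [ih (a + 1) v h0 (by rw [pow_succ]; omega)]
      simp only [pvBitsVal, hc, Bool.false_eq_true, if_false]
      ring

-- A's first loop builds the reverse of the input
theorem pv_foldl_app {α β : Type} (l : List α) (f : α → β) :
    ∀ (acc : List β), l.foldl (fun acc i => acc ++ [f i]) acc = acc ++ l.map f := by
  induction l with
  | nil => simp
  | cons x t ih => intro acc; simp [ih]

theorem pv_valMatrix_eq (xs : List String) :
    (PySem.List.pyRange (xs.length : Int) 0 (-1)).foldl
      (fun acc index => acc ++ [PySem.List.pyGetD xs (index - 1) ""]) []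
    = xs.reverse := by
  rw [pv_foldl_app, List.nil_append, PySem.List.pyRange_neg_one, List.map_map]
  apply List.ext_getElem
  · simp
  · intro k h1 h2
    simp only [List.length_map, List.length_range, Int.sub_zero, Int.toNat_natCast] at h1
    simp only [List.getElem_map, List.getElem_range, Function.comp_apply, List.getElem_reverse]
    rw [PySem.List.pyGetD_eq_getElem xs "" (by omega) (by omega)]
    congr 1
    omega

-- B is Horner's rule: its fold computes the LSB-first value of the reversed list
theorem pv_horner (xs : List String) : ∀ (v : Int),
    xs.foldl (fun value c => 2 * value + (if c == "1" then 1 else 0)) v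
    = v * 2 ^ xs.length + pvBitsVal xs.reverse := by
  induction xs with
  | nil => intro v; simp [pvBitsVal]
  | cons c t ih =>
    intro v
    simp only [List.foldl_cons, ih, List.reverse_cons, pvBitsVal_append_singleton,
      List.length_reverse, List.length_cons]
    ring

-- ===== VERDICT (by name: the statement is the Claim_ definition above) =====
theorem getValueFromList_spec : Claim_equal_getValueFromList := by
  intro xs _
  show getValueFromList xs = getValueFromList_alt xs
  unfold getValueFromList getValueFromList_alt
  simp only [pv_valMatrix_eq]
  have henum := PySem.List.enumerate_eq_map_pyRange xs.reverse ""
  have hlen : PySem.List.len xs.reverse = ((xs.reverse.length : Nat) : Int) := by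
    simp [PySem.List.len_eq]
  rw [hlen] at henum
  have hfold :
      (PySem.List.pyRange 0 (xs.reverse.length : Int) 1).foldl
        (fun value i =>
          if PySem.List.pyGetD xs.reverse i "" == "1" then
            PySem.Int.bor value ((1 : Int) <<< i.toNat)
          else value) 0
      = (PySem.List.enumerate xs.reverse (0 : Int)).foldl
          (fun value p => if p.2 == "1" then PySem.Int.bor value (@HShiftLeft.hShiftLeft Int Nat Int Int.instHShiftLeftNat (1 : Int) p.1.toNat) else value) 0 := by
    rw [henum, List.foldl_map]
  rw [hfold]
  have hef := pv_enum_fold xs.reverse 0 0 le_rfl (by norm_num)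
  rw [Nat.cast_zero] at hef
  rw [hef, pv_horner xs 0]
  simp
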